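-- pv_equiv track=rewrite | github.com/montymerlin/mdpowers-plugin | skills/transcribe/scripts/lib/speakers.py | map_speakers_by_order
-- ===== SOURCE A (Python) =====
-- def map_speakers_by_order(
--     segments: list[dict],
--     names: list[str]
-- ) -> dict[str, str]:
--     """
--     Map speaker labels to names by order of first appearance.
--
--     Used when speaker names are provided via command-line (--speakers flag),
--     bypassing GPT guessing. Assigns names in the order that diarization labels
--     first appear in the transcript.
--
--     Args:
--         segments: Transcript segments with 'speaker' key.
--         names: List of speaker names in appearance order.
--
--     Returns:
--         Dict mapping diarization labels (SPEAKER_XX) to names. Includes the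
--         label itself as fallback if there are more unique speakers than names.
--     """
--     seen: dict[str, int] = {}
--     for seg in segments:
--         spk = seg.get("speaker", "")
--         if spk and spk not in seen and spk != "UNKNOWN":
--             seen[spk] = len(seen)
--     mapping = {}
--     for spk, idx in seen.items():
--         mapping[spk] = names[idx] if idx < len(names) else spk
--     return mapping
-- ===== SOURCE B (Python) =====
-- def map_speakers_by_order(
--     segments: list[dict],
--     names: list[str]
-- ) -> dict[str, str]:
--     """Single pass: assign each newly seen speaker its name immediately,
--     deriving the first-appearance index from the current size of the result."""
--     mapping: dict[str, str] = {}
--     for seg in segments: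
--         spk = seg.get("speaker", "")
--         if spk and spk not in mapping and spk != "UNKNOWN":
--             mapping[spk] = names[len(mapping)] if len(mapping) < len(names) else spk
--     return mapping
-- ===== Notes on version B (the rewrite author's own statement) =====
-- stated objective: simpler
-- what changed: B fuses A's two passes (build a label->index dict, then translate indices through names) into one pass that builds the result dict directly, deriving the first-appearance index from the current size of the result and dropping the intermediate 'seen' dict.
import Mathlib
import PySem

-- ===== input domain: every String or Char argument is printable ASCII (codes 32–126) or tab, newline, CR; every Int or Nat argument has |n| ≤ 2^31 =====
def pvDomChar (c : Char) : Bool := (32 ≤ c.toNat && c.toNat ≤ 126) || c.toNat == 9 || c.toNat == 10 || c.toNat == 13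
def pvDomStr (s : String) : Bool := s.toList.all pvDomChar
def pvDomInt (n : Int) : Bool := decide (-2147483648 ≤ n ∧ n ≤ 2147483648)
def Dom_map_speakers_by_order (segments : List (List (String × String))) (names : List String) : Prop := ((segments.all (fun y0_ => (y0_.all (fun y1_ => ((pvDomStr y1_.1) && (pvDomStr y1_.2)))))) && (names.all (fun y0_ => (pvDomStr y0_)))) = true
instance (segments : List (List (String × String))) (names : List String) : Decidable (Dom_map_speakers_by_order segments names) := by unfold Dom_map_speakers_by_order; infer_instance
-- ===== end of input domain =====

-- B fuses A's two loops into one pass that builds the result dict directly (objective: simpler).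

-- ===== PORT A =====
-- loop body of A's first loop ('seen[spk] = len(seen)' for fresh admissible speakers)
def pvStepA (seen : PySem.Dict String Int) (seg : List (String × String)) : PySem.Dict String Int :=
  let spk := (PySem.Dict.mk seg).getD "speaker" ""
  if spk ≠ "" ∧ seen.contains spk = false ∧ spk ≠ "UNKNOWN" then
    seen.insert spk (seen.size : Int)
  else seen

def map_speakers_by_order (segments : List (List (String × String))) (names : List String) : List (String × String) :=
  let seen : PySem.Dict String Int := segments.foldl pvStepA PySem.Dict.empty
  let mapping : PySem.Dict String String :=
    seen.items.foldl
      (fun mapping p =>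
        mapping.insert p.1 (if p.2 < (names.length : Int) then PySem.List.pyGetD names p.2 "" else p.1))
      PySem.Dict.empty
  mapping.items

-- ===== PORT B =====
-- loop body of B's single loop: assign the name (or the label itself) at first appearance
def pvStepB (names : List String) (mapping : PySem.Dict String String) (seg : List (String × String)) : PySem.Dict String String :=
  let spk := (PySem.Dict.mk seg).getD "speaker" ""
  if spk ≠ "" ∧ mapping.contains spk = false ∧ spk ≠ "UNKNOWN" then
    mapping.insert spk
      (if (mapping.size : Int) < (names.length : Int) then PySem.List.pyGetD names (mapping.size : Int) "" else spk)
  else mapping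

def map_speakers_by_order_alt (segments : List (List (String × String))) (names : List String) : List (String × String) :=
  (segments.foldl (pvStepB names) PySem.Dict.empty).items

-- ===== PRECONDITION & SPEC =====
def Spec_map_speakers_by_order (segments : List (List (String × String))) (names : List String) (out : List (String × String)) : Prop := out = map_speakers_by_order_alt segments names
instance (segments : List (List (String × String))) (names : List String) (out : List (String × String)) : Decidable (Spec_map_speakers_by_order segments names out) := by unfold Spec_map_speakers_by_order; infer_instance

-- ===== CLAIM (what is proved, stated in full; the proofs are below) =====
def Claim_equal_map_speakers_by_order : Prop := ∀ (segments : List (List (String × String))) (names : List String), Dom_map_speakers_by_order segments names → Spec_map_speakers_by_order segments names (map_speakers_by_order segments names)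

-- ===== LEMMAS AND PROOFS =====

-- A's 'seen' after processing ks (in order): each speaker paired with its first-appearance index
def pvItemsA (ks : List String) : List (String × Int) :=
  ks.zipIdx.map (fun p => (p.1, (p.2 : Int)))

-- the value A's second loop assigns to the pair (spk, idx)
def pvPost (names : List String) (p : String × Int) : String :=
  if p.2 < (names.length : Int) then PySem.List.pyGetD names p.2 "" else p.1

-- B's 'mapping' after processing the same speakers ks
def pvItemsB (names : List String) (ks : List String) : List (String × String) :=
  (pvItemsA ks).map (fun p => (p.1, pvPost names p))

lemma pvItemsA_fst (ks : List String) : (pvItemsA ks).map Prod.fst = ks := by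
  simp only [pvItemsA, List.map_map, Function.comp_def]
  simpa using List.zipIdx_map_fst 0 ks

lemma pvItemsB_fst (names ks : List String) : (pvItemsB names ks).map Prod.fst = ks := by
  simp only [pvItemsB, List.map_map, Function.comp_def]
  simpa [pvItemsA, List.map_map, Function.comp_def] using pvItemsA_fst ks

lemma pvItemsA_append (ks : List String) (s : String) :
    pvItemsA (ks ++ [s]) = pvItemsA ks ++ [(s, (ks.length : Int))] := by
  simp [pvItemsA, List.zipIdx_append]

lemma pvContains_mk_itemsA (ks : List String) (s : String) :
    (PySem.Dict.mk (pvItemsA ks)).contains s = decide (s ∈ ks) := by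
  rw [PySem.Dict.contains_eq_decide_mem_keys]
  simp [PySem.Dict.keys, pvItemsA_fst]

lemma pvContains_mk_itemsB (names ks : List String) (s : String) :
    (PySem.Dict.mk (pvItemsB names ks)).contains s = decide (s ∈ ks) := by
  rw [PySem.Dict.contains_eq_decide_mem_keys]
  simp [PySem.Dict.keys, pvItemsB_fst]

-- the two loops stay in lockstep: both states are determined by the list ks of admissible
-- speakers seen so far, in first-appearance order
lemma pvLoop (names : List String) : ∀ (segs : List (List (String × String))) (ks : List String),
    ks.Nodup →
    ∃ ks', ks'.Nodup ∧
      segs.foldl pvStepA (PySem.Dict.mk (pvItemsA ks)) = PySem.Dict.mk (pvItemsA ks') ∧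
      segs.foldl (pvStepB names) (PySem.Dict.mk (pvItemsB names ks)) = PySem.Dict.mk (pvItemsB names ks') := by
  intro segs
  induction segs with
  | nil => intro ks h; exact ⟨ks, h, rfl, rfl⟩
  | cons seg rest ih =>
    intro ks h
    simp only [List.foldl_cons]
    set spk := (PySem.Dict.mk seg).getD "speaker" "" with hspk
    by_cases hc : spk ≠ "" ∧ spk ∉ ks ∧ spk ≠ "UNKNOWN"
    · have hA : pvStepA (PySem.Dict.mk (pvItemsA ks)) seg = PySem.Dict.mk (pvItemsA (ks ++ [spk])) := by
        have hcont := pvContains_mk_itemsA ks spk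
        apply PySem.Dict.ext
        simp only [pvStepA, ← hspk, hcont]
        rw [if_pos ⟨hc.1, by simp [hc.2.1], hc.2.2⟩]
        rw [PySem.Dict.items_insert_of_not_contains _ _ (by simp [hcont, hc.2.1])]
        rw [pvItemsA_append]
        simp [PySem.Dict.items, PySem.Dict.size, pvItemsA]
      have hB : pvStepB names (PySem.Dict.mk (pvItemsB names ks)) seg = PySem.Dict.mk (pvItemsB names (ks ++ [spk])) := by
        have hcont := pvContains_mk_itemsB names ks spk
        apply PySem.Dict.ext
        simp only [pvStepB, ← hspk, hcont]
        rw [if_pos ⟨hc.1, by simp [hc.2.1], hc.2.2⟩]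
        rw [PySem.Dict.items_insert_of_not_contains _ _ (by simp [hcont, hc.2.1])]
        simp only [pvItemsB, pvItemsA_append, List.map_append]
        simp [PySem.Dict.items, PySem.Dict.size, pvPost, pvItemsA]
      rw [hA, hB]
      exact ih (ks ++ [spk]) (by simp [List.nodup_append, h]; exact fun a ha he => hc.2.1 (he ▸ ha))
    · have hA : pvStepA (PySem.Dict.mk (pvItemsA ks)) seg = PySem.Dict.mk (pvItemsA ks) := by
        simp only [pvStepA, ← hspk, pvContains_mk_itemsA]
        rw [if_neg]
        intro ⟨h1, h2, h3⟩
        exact hc ⟨h1, by simpa using h2, h3⟩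
      have hB : pvStepB names (PySem.Dict.mk (pvItemsB names ks)) seg = PySem.Dict.mk (pvItemsB names ks) := by
        simp only [pvStepB, ← hspk, pvContains_mk_itemsB]
        rw [if_neg]
        intro ⟨h1, h2, h3⟩
        exact hc ⟨h1, by simpa using h2, h3⟩
      rw [hA, hB]
      exact ih ks h

-- ===== VERDICT (by name: the statement is the Claim_ definition above) =====
theorem map_speakers_by_order_spec : Claim_equal_map_speakers_by_order := by
  intro segments names _
  unfold Spec_map_speakers_by_order map_speakers_by_order map_speakers_by_order_alt
  obtain ⟨ks, hnd, hA, hB⟩ := pvLoop names segments [] List.nodup_nil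
  have hinitA : (PySem.Dict.empty : PySem.Dict String Int) = PySem.Dict.mk (pvItemsA []) := rfl
  have hinitB : (PySem.Dict.empty : PySem.Dict String String) = PySem.Dict.mk (pvItemsB names []) := rfl
  rw [hinitA, hinitB, hA, hB]
  have hfresh : ∀ p ∈ pvItemsA ks, (PySem.Dict.empty : PySem.Dict String String).contains p.1 = false := by
    intro p _; simp [PySem.Dict.contains_empty]
  have hkeys : ((pvItemsA ks).map Prod.fst).Nodup := by rw [pvItemsA_fst]; exact hnd
  have := PySem.Dict.items_foldl_insert_fresh (l := pvItemsA ks)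
    (k := Prod.fst) (v := fun p => if p.2 < (names.length : Int) then PySem.List.pyGetD names p.2 "" else p.1)
    (d := PySem.Dict.empty) hfresh hkeys
  rw [show ({ items := pvItemsB names [] } : PySem.Dict String String) = PySem.Dict.empty from rfl, this]
  simp [PySem.Dict.empty, pvItemsB, pvPost]
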